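-- pv_equiv track=rewrite | github.com/Denis-Telyatnikov/Pattern_Recognition | k-folg_cross-validation_LSN.py | creating_different_subsamples
-- ===== SOURCE A (Python) =====
-- def creating_different_subsamples(xp, yp):
--     matrix_x = []
--     matrix_y = []
--     for i in range(len(xp)):
--         o_x = []
--         o_y = []
--         for j in range(len(xp)):
--             if i == j:
--                 continue
--             else:
--                 o_x.extend(xp[j])
--                 o_y.extend(yp[j])
--         matrix_x.append(o_x)
--         matrix_y.append(o_y)
--     return matrix_x, matrix_y
-- ===== SOURCE B (Python) =====
-- def creating_different_subsamples(xp, yp):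
--     n = len(xp)
--     # prefix[i] = concatenation of blocks 0..i-1
--     prefix_x, prefix_y = [[]], [[]]
--     acc_x, acc_y = [], []
--     for j in range(n - 1):
--         acc_x = acc_x + xp[j]
--         acc_y = acc_y + yp[j]
--         prefix_x.append(acc_x)
--         prefix_y.append(acc_y)
--     # suffix[i] = concatenation of blocks i+1..n-1
--     suffix_x, suffix_y = [[]], [[]]
--     acc_x, acc_y = [], []
--     for j in range(n - 1, 0, -1):
--         acc_x = xp[j] + acc_x
--         acc_y = yp[j] + acc_y
--         suffix_x.append(acc_x)
--         suffix_y.append(acc_y)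
--     suffix_x.reverse()
--     suffix_y.reverse()
--     matrix_x = [prefix_x[i] + suffix_x[i] for i in range(n)]
--     matrix_y = [prefix_y[i] + suffix_y[i] for i in range(n)]
--     return matrix_x, matrix_y
-- ===== Notes on version B (the rewrite author's own statement) =====
-- stated objective: alternative
-- what changed: Replaces the nested re-scan (for every held-out index i, re-walk all n blocks and extend) by one forward prefix pass and one backward suffix pass; each leave-one-out row is then assembled as prefix[i] + suffix[i].
import Mathlib
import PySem

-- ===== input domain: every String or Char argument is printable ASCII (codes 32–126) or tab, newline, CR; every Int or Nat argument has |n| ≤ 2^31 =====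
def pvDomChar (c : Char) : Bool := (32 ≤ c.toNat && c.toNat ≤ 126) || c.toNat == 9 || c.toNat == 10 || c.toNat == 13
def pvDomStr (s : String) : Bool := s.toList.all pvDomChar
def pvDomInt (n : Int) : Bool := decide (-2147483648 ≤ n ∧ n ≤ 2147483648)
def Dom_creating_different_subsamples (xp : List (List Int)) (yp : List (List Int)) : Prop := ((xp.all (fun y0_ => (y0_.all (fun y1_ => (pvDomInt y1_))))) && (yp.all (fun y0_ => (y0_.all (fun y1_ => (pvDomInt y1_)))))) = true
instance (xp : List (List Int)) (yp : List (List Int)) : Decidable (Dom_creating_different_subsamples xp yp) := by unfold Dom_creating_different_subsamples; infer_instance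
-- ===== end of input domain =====

-- B replaces the nested rebuild-everything-but-i scans by one prefix pass, one suffix pass
-- and an assembly pass (objective: alternative decomposition; same output, same cost).

-- ===== PORT A =====
-- Indices j run over range(len(xp)); xp[j] is always in range, and yp[j] is in range
-- exactly on Pre_ below (outside it Python raises IndexError), so `getD` is exact there.
def creating_different_subsamples (xp : List (List Int)) (yp : List (List Int)) : List (List Int) × List (List Int) :=
  (List.range xp.length).foldl
    (fun m i =>
      let o := (List.range xp.length).foldl
        (fun o j => if i = j then o else (o.1 ++ xp.getD j [], o.2 ++ yp.getD j []))
        ([], [])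
      (m.1 ++ [o.1], m.2 ++ [o.2]))
    ([], [])

-- ===== PORT B =====
-- Same indexing discipline: all accesses are xp[j]/yp[j] for j < len(xp), exact under Pre_.
def creating_different_subsamples_alt (xp : List (List Int)) (yp : List (List Int)) : List (List Int) × List (List Int) :=
  let n := xp.length
  -- forward pass: prefix[i] = blocks 0..i-1, with running accumulators
  let p := (List.range (n - 1)).foldl
    (fun (s : (List (List Int) × List (List Int)) × (List Int × List Int)) j =>
      let ax := s.2.1 ++ xp.getD j []
      let ay := s.2.2 ++ yp.getD j []
      ((s.1.1 ++ [ax], s.1.2 ++ [ay]), (ax, ay)))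
    (([[]], [[]]), ([], []))
  -- backward pass over j = n-1, …, 1: suffix entries, reversed afterwards
  let sfold := ((List.range' 1 (n - 1)).reverse).foldl
    (fun (s : (List (List Int) × List (List Int)) × (List Int × List Int)) j =>
      let ax := xp.getD j [] ++ s.2.1
      let ay := yp.getD j [] ++ s.2.2
      ((s.1.1 ++ [ax], s.1.2 ++ [ay]), (ax, ay)))
    (([[]], [[]]), ([], []))
  let sx := sfold.1.1.reverse
  let sy := sfold.1.2.reverse
  ((List.range n).map (fun i => (p.1.1.getD i []) ++ (sx.getD i [])),
   (List.range n).map (fun i => (p.1.2.getD i []) ++ (sy.getD i [])))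

-- ===== PRECONDITION & SPEC =====
-- Pre_ excludes exactly the inputs where the Python A raises IndexError on yp[j]:
-- when len(xp) ≥ 2 every index 0..len(xp)-1 of yp is accessed (B raises there too).
def Pre_creating_different_subsamples (xp : List (List Int)) (yp : List (List Int)) : Prop :=
  xp.length ≤ 1 ∨ xp.length ≤ yp.length
instance (xp : List (List Int)) (yp : List (List Int)) : Decidable (Pre_creating_different_subsamples xp yp) := by unfold Pre_creating_different_subsamples; infer_instance

def pvWitness_creating_different_subsamples : List (List Int) × List (List Int) :=
  ([[1, 2], [3], [4, 5]], [[0], [1], [2]])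

def Spec_creating_different_subsamples (xp : List (List Int)) (yp : List (List Int)) (out : List (List Int) × List (List Int)) : Prop := out = creating_different_subsamples_alt xp yp
instance (xp : List (List Int)) (yp : List (List Int)) (out : List (List Int) × List (List Int)) : Decidable (Spec_creating_different_subsamples xp yp out) := by unfold Spec_creating_different_subsamples; infer_instance

-- ===== CLAIM (what is proved, stated in full; the proofs are below) =====
def Claim_equal_creating_different_subsamples : Prop := ∀ (xp : List (List Int)) (yp : List (List Int)), Dom_creating_different_subsamples xp yp → Pre_creating_different_subsamples xp yp → Spec_creating_different_subsamples xp yp (creating_different_subsamples xp yp)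

-- ===== LEMMAS AND PROOFS =====

-- concatenation of the blocks of l selected by the index list js
def pvCat (l : List (List Int)) (js : List Nat) : List Int := js.flatMap (fun j => l.getD j [])

theorem pvCat_append (l : List (List Int)) (js ks : List Nat) :
    pvCat l (js ++ ks) = pvCat l js ++ pvCat l ks := by
  simp [pvCat]

theorem pvCat_single (l : List (List Int)) (a : Nat) : pvCat l [a] = l.getD a [] := by
  simp [pvCat]

-- A's inner loop: skipping index i, the fold concatenates the non-i blocks
theorem innerA (l1 l2 : List (List Int)) (i : Nat) :
    ∀ (js : List Nat) (u v : List Int),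
      js.foldl (fun o j => if i = j then o else (o.1 ++ l1.getD j [], o.2 ++ l2.getD j [])) (u, v)
      = (u ++ pvCat l1 (js.filter (fun j => i ≠ j)),
         v ++ pvCat l2 (js.filter (fun j => i ≠ j))) := by
  intro js
  induction js with
  | nil => intro u v; simp [pvCat]
  | cons j js ih =>
      intro u v
      simp only [List.foldl_cons]
      by_cases h : i = j
      · rw [if_pos h, ih, List.filter_cons_of_neg (by simp [h])]
      · rw [if_neg h, ih, List.filter_cons_of_pos (by simp [h])]
        simp [pvCat]

-- A's outer loop appends one row per index
theorem outerA (f g : Nat → List Int) :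
    ∀ (js : List Nat) (mx my : List (List Int)),
      js.foldl (fun m i => (m.1 ++ [f i], m.2 ++ [g i])) (mx, my)
      = (mx ++ js.map f, my ++ js.map g) := by
  intro js
  induction js with
  | nil => intro mx my; simp
  | cons j js ih => intro mx my; simp [List.foldl_cons, ih]

-- B's forward pass: prefix table and running accumulator
theorem prefixB (l1 l2 : List (List Int)) :
    ∀ (m : Nat),
      (List.range m).foldl
        (fun (s : (List (List Int) × List (List Int)) × (List Int × List Int)) j =>
          let ax := s.2.1 ++ l1.getD j []
          let ay := s.2.2 ++ l2.getD j []
          ((s.1.1 ++ [ax], s.1.2 ++ [ay]), (ax, ay)))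
        (([[]], [[]]), ([], []))
      = (((List.range (m + 1)).map (fun i => pvCat l1 (List.range i)),
          (List.range (m + 1)).map (fun i => pvCat l2 (List.range i))),
         (pvCat l1 (List.range m), pvCat l2 (List.range m))) := by
  intro m
  induction m with
  | zero => simp [pvCat]
  | succ m ih =>
      have h1 : ∀ (l : List (List Int)), pvCat l (List.range (m + 1)) = pvCat l (List.range m) ++ l.getD m [] := by
        intro l; rw [List.range_succ, pvCat_append, pvCat_single]
      rw [List.range_succ, List.foldl_append, ih]
      simp only [List.foldl_cons, List.foldl_nil]
      rw [List.range_succ (n := m + 1), List.map_append, List.map_append]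
      refine Prod.ext (Prod.ext ?_ ?_) (Prod.ext ?_ ?_) <;>
        simp [h1, pvCat_append, pvCat_single]

-- B's backward pass, generalized over the initial state
theorem suffixB (l1 l2 : List (List Int)) :
    ∀ (b : Nat) (s1 s2 : List (List Int)) (a1 a2 : List Int),
      ((List.range' 1 b).reverse).foldl
        (fun (s : (List (List Int) × List (List Int)) × (List Int × List Int)) j =>
          let ax := l1.getD j [] ++ s.2.1
          let ay := l2.getD j [] ++ s.2.2
          ((s.1.1 ++ [ax], s.1.2 ++ [ay]), (ax, ay)))
        ((s1, s2), (a1, a2))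
      = ((s1 ++ ((List.range' 1 b).reverse).map (fun j => pvCat l1 (List.range' j (b + 1 - j)) ++ a1),
          s2 ++ ((List.range' 1 b).reverse).map (fun j => pvCat l2 (List.range' j (b + 1 - j)) ++ a2)),
         (pvCat l1 (List.range' 1 b) ++ a1, pvCat l2 (List.range' 1 b) ++ a2)) := by
  intro b
  induction b with
  | zero => intro s1 s2 a1 a2; simp [pvCat]
  | succ b ih =>
      intro s1 s2 a1 a2
      have he : (1 : Nat) + 1 * b = b + 1 := by ring
      have hsp : List.range' 1 (b + 1) = List.range' 1 b ++ [b + 1] := by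
        rw [List.range'_concat, he]
      have hmap : ∀ (l : List (List Int)) (a : List Int),
          List.map (fun j => pvCat l (List.range' j (b + 1 - j)) ++ (l.getD (b + 1) [] ++ a))
              ((List.range' 1 b).reverse)
            = List.map (fun j => pvCat l (List.range' j (b + 1 + 1 - j)) ++ a)
              ((List.range' 1 b).reverse) := by
        intro l a
        apply List.map_congr_left
        intro j hj
        rw [List.mem_reverse, List.mem_range'_1] at hj
        have h1 : b + 1 + 1 - j = (b + 1 - j) + 1 := by omega
        have h2 : j + 1 * (b + 1 - j) = b + 1 := by omega
        rw [h1, List.range'_concat, h2, pvCat_append, pvCat_single, List.append_assoc]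
      have hone : ∀ (l : List (List Int)), pvCat l (List.range' (b + 1) (b + 1 + 1 - (b + 1))) = l.getD (b + 1) [] := by
        intro l
        have h3 : b + 1 + 1 - (b + 1) = 1 := by omega
        rw [h3]
        show pvCat l [b + 1] = _
        exact pvCat_single l (b + 1)
      rw [hsp, List.reverse_append, List.reverse_singleton, List.singleton_append, List.foldl_cons]
      refine (ih (s1 ++ [l1.getD (b + 1) [] ++ a1]) (s2 ++ [l2.getD (b + 1) [] ++ a2])
                (l1.getD (b + 1) [] ++ a1) (l2.getD (b + 1) [] ++ a2)).trans ?_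
      simp only [Prod.mk.injEq]
      refine ⟨⟨?_, ?_⟩, ?_, ?_⟩
      · rw [List.map_cons, hone, hmap]; simp
      · rw [List.map_cons, hone, hmap]; simp
      · rw [pvCat_append, pvCat_single]; simp
      · rw [pvCat_append, pvCat_single]; simp

-- range n with i removed splits into the part below i and the part above i
theorem filter_range_ne (n i : Nat) (hi : i < n) :
    (List.range n).filter (fun j => i ≠ j)
      = List.range i ++ List.range' (i + 1) (n - 1 - i) := by
  have h1 : (i :: List.range' (i + 1) (n - 1 - i)) = List.range' i (n - i) := by
    have hni : n - i = (n - 1 - i) + 1 := by omega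
    rw [hni, List.range'_succ]
  have hsplit : List.range n = List.range' 0 i ++ (i :: List.range' (i + 1) (n - 1 - i)) := by
    rw [List.range_eq_range', h1]
    have h2 := List.range'_append (s := 0) (m := i) (n := n - i) (step := 1)
    simp only [Nat.one_mul, Nat.zero_add] at h2
    rw [h2, show i + (n - i) = n from by omega]
  rw [hsplit, List.filter_append]
  congr 1
  · rw [← List.range_eq_range']
    apply List.filter_eq_self.mpr
    intro j hj
    rw [List.mem_range] at hj
    simp; omega
  · rw [List.filter_cons]
    simp only [ne_eq, not_true_eq_false, decide_false]
    apply List.filter_eq_self.mpr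
    intro j hj
    rw [List.mem_range'_1] at hj
    simp; omega

-- A in closed form
theorem A_closed (xp yp : List (List Int)) :
    creating_different_subsamples xp yp
      = ((List.range xp.length).map (fun i => pvCat xp ((List.range xp.length).filter (fun j => i ≠ j))),
         (List.range xp.length).map (fun i => pvCat yp ((List.range xp.length).filter (fun j => i ≠ j)))) := by
  unfold creating_different_subsamples
  have hfun : (fun (m : List (List Int) × List (List Int)) i =>
        let o := (List.range xp.length).foldl
          (fun o j => if i = j then o else (o.1 ++ xp.getD j [], o.2 ++ yp.getD j []))
          ([], [])
        (m.1 ++ [o.1], m.2 ++ [o.2]))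
      = (fun m i => (m.1 ++ [pvCat xp ((List.range xp.length).filter (fun j => i ≠ j))],
                     m.2 ++ [pvCat yp ((List.range xp.length).filter (fun j => i ≠ j))])) := by
    funext m i
    rw [innerA]
    simp
  rw [hfun, outerA]
  simp

-- B in closed form
theorem B_closed (xp yp : List (List Int)) :
    creating_different_subsamples_alt xp yp
      = ((List.range xp.length).map
           (fun i => pvCat xp (List.range i) ++ pvCat xp (List.range' (i + 1) (xp.length - 1 - i))),
         (List.range xp.length).map
           (fun i => pvCat yp (List.range i) ++ pvCat yp (List.range' (i + 1) (xp.length - 1 - i)))) := by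
  unfold creating_different_subsamples_alt
  simp only [prefixB, suffixB]
  have hrev : ∀ (g : Nat → List Int) (b : Nat),
      (([([] : List Int)] ++ List.map g ((List.range' 1 b).reverse)).reverse)
        = List.map g (List.range' 1 b) ++ [([] : List Int)] := by
    intro g b
    rw [List.reverse_append]
    simp
  have hgetP : ∀ (l : List (List Int)) (i : Nat), i < xp.length →
      (((List.range (xp.length - 1 + 1)).map (fun k => pvCat l (List.range k))).getD i [])
        = pvCat l (List.range i) := by
    intro l i hi
    have hlen : i < ((List.range (xp.length - 1 + 1)).map (fun k => pvCat l (List.range k))).length := by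
      simp; omega
    rw [List.getD_eq_getElem _ _ hlen]
    simp
  have hgetS : ∀ (l : List (List Int)) (i : Nat), i < xp.length →
      ((List.map (fun j => pvCat l (List.range' j (xp.length - 1 + 1 - j)) ++ ([] : List Int))
          (List.range' 1 (xp.length - 1)) ++ [([] : List Int)]).getD i [])
        = pvCat l (List.range' (i + 1) (xp.length - 1 - i)) := by
    intro l i hi
    by_cases hlast : i = xp.length - 1
    · subst hlast
      rw [List.getD_eq_getElem _ _ (by simp)]
      rw [List.getElem_append_right (by simp)]
      have hz : xp.length - 1 - (xp.length - 1) = 0 := by omega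
      simp [pvCat]
    · have hilt : i < xp.length - 1 := by omega
      rw [List.getD_eq_getElem _ _ (by simp; omega)]
      rw [List.getElem_append_left (by simp; omega)]
      rw [List.getElem_map, List.getElem_range']
      have h5 : (1 : Nat) + 1 * i = i + 1 := by ring
      rw [h5]
      have h4 : xp.length - 1 + 1 - (i + 1) = xp.length - 1 - i := by omega
      rw [h4, List.append_nil]
  refine Prod.ext ?_ ?_ <;>
    · simp only [hrev]
      apply List.map_congr_left
      intro i hi
      rw [List.mem_range] at hi
      rw [hgetP _ _ hi, hgetS _ _ hi]

-- ===== VERDICT (by name: the statement is the Claim_ definition above) =====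
theorem creating_different_subsamples_spec : Claim_equal_creating_different_subsamples := by
  intro xp yp _hdom _hpre
  unfold Spec_creating_different_subsamples
  rw [A_closed, B_closed]
  refine Prod.ext ?_ ?_ <;>
    · apply List.map_congr_left
      intro i hi
      rw [List.mem_range] at hi
      rw [filter_range_ne _ _ hi, pvCat_append]
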